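-- pv_equiv track=rewrite | github.com/Gowrisankar97/abhurdash | dataps.py | doshavalues
-- ===== SOURCE A (Python) =====
-- def doshavalues(vv):
--     dv=[0,0,0]
--     for v in vv:
--         vata=["Vata-samaa","Vata-vrriddhi","Vata-kshaya"]
--         pitta=["Pitta-samaa","Pitta-kshaya","Pitta-vriddhi"]
--         kappa=["Kapha-samaa","Kapha-kshaya","Kapha-vriddhi"]
--         if str(v) in vata:
--              dv[0]=1
--         elif str(v)in pitta:
--              dv[1]=1
--         elif str(v) in kappa:
--              dv[2]=1
--     return dv
-- ===== SOURCE B (Python) =====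
-- _CATEGORIES = (
--     ("Vata-samaa", "Vata-vrriddhi", "Vata-kshaya"),
--     ("Pitta-samaa", "Pitta-kshaya", "Pitta-vriddhi"),
--     ("Kapha-samaa", "Kapha-kshaya", "Kapha-vriddhi"),
-- )
--
-- def doshavalues(vv):
--     # One staged pass per category: outer loop over the three categories,
--     # inner short-circuiting scan over the inputs; no mutable flag state.
--     return [int(any(str(v) in cat for v in vv)) for cat in _CATEGORIES]
-- ===== Notes on version B (the rewrite author's own statement) =====
-- stated objective: idiomatic
-- what changed: Inverts the loop nesting: instead of A's single pass over the inputs mutating three flags via an if/elif chain (rebuilding the category lists each iteration), B maps over the three fixed categories and computes each flag with a short-circuiting any() scan of the inputs, with no mutable state.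
import Mathlib
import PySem

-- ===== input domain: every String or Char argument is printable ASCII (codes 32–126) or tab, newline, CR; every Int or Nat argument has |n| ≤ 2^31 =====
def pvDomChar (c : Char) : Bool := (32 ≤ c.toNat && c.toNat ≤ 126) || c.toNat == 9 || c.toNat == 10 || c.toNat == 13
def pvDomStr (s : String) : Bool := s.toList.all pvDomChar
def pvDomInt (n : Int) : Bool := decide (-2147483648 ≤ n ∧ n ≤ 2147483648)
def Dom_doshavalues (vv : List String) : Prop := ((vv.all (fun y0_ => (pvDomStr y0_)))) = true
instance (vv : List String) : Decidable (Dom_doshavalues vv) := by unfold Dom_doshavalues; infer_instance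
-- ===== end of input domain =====

-- ===== PORT A =====
-- B inverts the loop nesting: a map over the three fixed categories, each flag an
-- any-scan of the inputs, instead of A's flag-mutating if/elif pass (idiomatic; same cost).
def doshavalues (vv : List String) : List Int :=
  let dv := vv.foldl (fun (dv : Int × Int × Int) v =>
    let vata := ["Vata-samaa", "Vata-vrriddhi", "Vata-kshaya"]
    let pitta := ["Pitta-samaa", "Pitta-kshaya", "Pitta-vriddhi"]
    let kappa := ["Kapha-samaa", "Kapha-kshaya", "Kapha-vriddhi"]
    if vata.contains v then (1, dv.2.1, dv.2.2)
    else if pitta.contains v then (dv.1, 1, dv.2.2)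
    else if kappa.contains v then (dv.1, dv.2.1, 1)
    else dv) (0, 0, 0)
  [dv.1, dv.2.1, dv.2.2]

-- ===== PORT B =====
def pvCategories : List (List String) :=
  [["Vata-samaa", "Vata-vrriddhi", "Vata-kshaya"],
   ["Pitta-samaa", "Pitta-kshaya", "Pitta-vriddhi"],
   ["Kapha-samaa", "Kapha-kshaya", "Kapha-vriddhi"]]

def doshavalues_alt (vv : List String) : List Int :=
  pvCategories.map (fun cat => if vv.any (fun v => cat.contains v) then (1 : Int) else 0)

-- ===== PRECONDITION & SPEC =====
def Spec_doshavalues (vv : List String) (out : List Int) : Prop := out = doshavalues_alt vv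
instance (vv : List String) (out : List Int) : Decidable (Spec_doshavalues vv out) := by unfold Spec_doshavalues; infer_instance

-- ===== CLAIM (what is proved, stated in full; the proofs are below) =====
def Claim_equal_doshavalues : Prop := ∀ (vv : List String), Dom_doshavalues vv → Spec_doshavalues vv (doshavalues vv)

-- ===== LEMMAS AND PROOFS =====
-- characterisation of A's fold: each flag becomes 1 iff some element is in the category
theorem doshavalues_fold (vv : List String) (dv : Int × Int × Int) :
    vv.foldl (fun (dv : Int × Int × Int) v =>
      let vata := ["Vata-samaa", "Vata-vrriddhi", "Vata-kshaya"]
      let pitta := ["Pitta-samaa", "Pitta-kshaya", "Pitta-vriddhi"]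
      let kappa := ["Kapha-samaa", "Kapha-kshaya", "Kapha-vriddhi"]
      if vata.contains v then (1, dv.2.1, dv.2.2)
      else if pitta.contains v then (dv.1, 1, dv.2.2)
      else if kappa.contains v then (dv.1, dv.2.1, 1)
      else dv) dv =
    ((if vv.any (["Vata-samaa", "Vata-vrriddhi", "Vata-kshaya"].contains ·) then 1 else dv.1),
     (if vv.any (["Pitta-samaa", "Pitta-kshaya", "Pitta-vriddhi"].contains ·) then 1 else dv.2.1),
     (if vv.any (["Kapha-samaa", "Kapha-kshaya", "Kapha-vriddhi"].contains ·) then 1 else dv.2.2)) := by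
  induction vv generalizing dv with
  | nil => simp
  | cons v vs ih =>
    simp only [List.foldl_cons, List.any_cons, ih]
    by_cases hv : v = "Vata-samaa" ∨ v = "Vata-vrriddhi" ∨ v = "Vata-kshaya" ∨
        v = "Pitta-samaa" ∨ v = "Pitta-kshaya" ∨ v = "Pitta-vriddhi" ∨
        v = "Kapha-samaa" ∨ v = "Kapha-kshaya" ∨ v = "Kapha-vriddhi"
    · rcases hv with rfl | rfl | rfl | rfl | rfl | rfl | rfl | rfl | rfl <;> simp
    · push_neg at hv
      obtain ⟨n1, n2, n3, n4, n5, n6, n7, n8, n9⟩ := hv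
      simp [List.contains_eq_mem, n1, n2, n3, n4, n5, n6, n7, n8, n9]

-- ===== VERDICT (by name: the statement is the Claim_ definition above) =====
theorem doshavalues_spec : Claim_equal_doshavalues := by
  intro vv _
  unfold Spec_doshavalues doshavalues doshavalues_alt pvCategories
  simp only [doshavalues_fold, List.map]
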